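-- pv_equiv track=rewrite | github.com/dhnesh12/codechef-solutions | 03-CodeChef-Medium/995--Bytelandian gold coins.py | coin_exchange_sum
-- ===== SOURCE A (Python) =====
-- obj = { 0 : 0, 1 : 1}
--
-- def coin_exchange_sum(coin):
--     coin_sum = coin//2 + coin//3 + coin//4
--     if coin in obj:
--         return obj[coin]
--     elif coin > coin_sum:
--         obj[coin] = coin
--     else:
--         obj[coin] = coin_exchange_sum(coin//2) \
--                             + coin_exchange_sum(coin//3) \
--                             + coin_exchange_sum(coin//4)
--     return obj[coin]
-- ===== SOURCE B (Python) =====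
-- def coin_exchange_sum(coin):
--     # Bottom-up DP: enumerate the reachable states coin // (2**a * 3**b),
--     # fill a memo table in increasing value order, read off the answer.
--     if coin < 12:
--         return coin
--     L = coin.bit_length()  # coin < 2 ** L
--     states = sorted({coin // (2 ** a * 3 ** b) for a in range(L) for b in range(L)})
--     memo = {}
--     for v in states:
--         if v >= 12:
--             c2, c3, c4 = v // 2, v // 3, v // 4
--             memo[v] = (c2 if c2 < 12 else memo[c2]) \
--                     + (c3 if c3 < 12 else memo[c3]) \
--                     + (c4 if c4 < 12 else memo[c4])
--     return memo[coin]
-- ===== Notes on version B (the rewrite author's own statement) =====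
-- stated objective: alternative
-- what changed: A's top-down memoised recursion (global dict seeded {0:0,1:1} plus the coin>coin_sum shortcut guard) is replaced by a bottom-up DP: enumerate the reachable states coin//(2^a*3^b) over the exponent grid, sort them, and fill a fresh memo in increasing value order with a single non-recursive loop.
import Mathlib
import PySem

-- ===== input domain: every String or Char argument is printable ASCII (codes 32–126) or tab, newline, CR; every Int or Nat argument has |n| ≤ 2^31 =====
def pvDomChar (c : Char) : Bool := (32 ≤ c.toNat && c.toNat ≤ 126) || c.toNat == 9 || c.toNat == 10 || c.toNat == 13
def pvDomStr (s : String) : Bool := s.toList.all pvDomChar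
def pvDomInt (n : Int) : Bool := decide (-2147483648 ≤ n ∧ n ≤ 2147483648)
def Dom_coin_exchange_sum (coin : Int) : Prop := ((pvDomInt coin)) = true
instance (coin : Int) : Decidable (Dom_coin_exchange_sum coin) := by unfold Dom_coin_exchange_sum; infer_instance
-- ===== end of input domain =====

-- B replaces A's top-down memoised recursion by a bottom-up DP over the reachable states
-- coin // (2^a * 3^b) filled in increasing value order (objective: alternative).
-- Python A memoises in a module-level dict that persists across calls (an observable side
-- effect B does not have); every cached value equals the function's own value on that key,
-- so the RETURN value is call-order independent and the port threads a per-call memo.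

-- ===== PORT A =====
-- fuel only makes the very same recursion total; the supplied fuel is never exhausted (proved below)
def pvGoA (fuel : Nat) (memo : PySem.Dict Int Int) (coin : Int) : PySem.Dict Int Int × Int :=
  match fuel with
  | 0 => (memo, 0)
  | fuel + 1 =>
    let coin_sum := PySem.Int.floordiv coin 2 + PySem.Int.floordiv coin 3 + PySem.Int.floordiv coin 4
    if memo.contains coin then (memo, memo.getD coin 0)
    else if coin > coin_sum then
      let m := memo.insert coin coin
      (m, m.getD coin 0)
    else
      let r1 := pvGoA fuel memo (PySem.Int.floordiv coin 2)
      let r2 := pvGoA fuel r1.1 (PySem.Int.floordiv coin 3)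
      let r3 := pvGoA fuel r2.1 (PySem.Int.floordiv coin 4)
      let m := r3.1.insert coin (r1.2 + r2.2 + r3.2)
      (m, m.getD coin 0)

def coin_exchange_sum (coin : Int) : Int :=
  (pvGoA (coin.toNat + 1) (PySem.Dict.ofList [(0, 0), (1, 1)]) coin).2

-- ===== PORT B =====
-- Source B's `(c if c < 12 else memo[c])`; the key is always present where this is reached (proved below)
def pvLook (m : PySem.Dict Int Int) (u : Int) : Int := if u < 12 then u else m.getD u 0

-- body of Source B's `for v in states:` loop
def pvStep (m : PySem.Dict Int Int) (v : Int) : PySem.Dict Int Int :=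
  if 12 ≤ v then
    m.insert v (pvLook m (PySem.Int.floordiv v 2) + pvLook m (PySem.Int.floordiv v 3) +
      pvLook m (PySem.Int.floordiv v 4))
  else m

-- Source B's `sorted({coin // (2**a * 3**b) for a in range(L) for b in range(L)})`;
-- a, b range over nonnegative ints, so `2**a * 3**b` is the Nat power cast (exact)
def pvStates (coin : Int) : List Int :=
  let L : Int := (PySem.Int.bitLength coin : Int)
  PySem.List.sorted (PySem.Set.ofList ((PySem.List.pyRange 0 L 1).flatMap (fun a =>
    (PySem.List.pyRange 0 L 1).map (fun b =>
      PySem.Int.floordiv coin ((2 ^ a.toNat * 3 ^ b.toNat : Nat) : Int))))) (fun x => x) false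

def coin_exchange_sum_alt (coin : Int) : Int :=
  if coin < 12 then coin
  else ((pvStates coin).foldl pvStep PySem.Dict.empty).getD coin 0

-- ===== PRECONDITION & SPEC =====
def Spec_coin_exchange_sum (coin : Int) (out : Int) : Prop := out = coin_exchange_sum_alt coin
instance (coin : Int) (out : Int) : Decidable (Spec_coin_exchange_sum coin out) := by unfold Spec_coin_exchange_sum; infer_instance

-- ===== CLAIM (what is proved, stated in full; the proofs are below) =====
def Claim_equal_coin_exchange_sum : Prop := ∀ (coin : Int), Dom_coin_exchange_sum coin → Spec_coin_exchange_sum coin (coin_exchange_sum coin)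

-- ===== LEMMAS AND PROOFS =====

-- the common value: f(n) = n for n < 12, else f(n//2) + f(n//3) + f(n//4)
def pvF (n : Int) : Int :=
  if n < 12 then n
  else pvF (PySem.Int.floordiv n 2) + pvF (PySem.Int.floordiv n 3) + pvF (PySem.Int.floordiv n 4)
termination_by n.toNat
decreasing_by
  all_goals rw [PySem.Int.floordiv_eq_ediv_of_pos (by norm_num)]; omega

lemma pvF_base (n : Int) (h : n < 12) : pvF n = n := by rw [pvF]; simp [h]

lemma pvF_step (n : Int) (h : ¬ n < 12) :
    pvF n = pvF (PySem.Int.floordiv n 2) + pvF (PySem.Int.floordiv n 3) + pvF (PySem.Int.floordiv n 4) := by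
  rw [pvF]; simp [h]

-- guard arithmetic for A
lemma pvSum_ge (c : Int) (h : 12 ≤ c) :
    c ≤ PySem.Int.floordiv c 2 + PySem.Int.floordiv c 3 + PySem.Int.floordiv c 4 := by
  rw [PySem.Int.floordiv_eq_ediv_of_pos (by norm_num), PySem.Int.floordiv_eq_ediv_of_pos (by norm_num),
    PySem.Int.floordiv_eq_ediv_of_pos (by norm_num)]
  omega

lemma pvSum_le (c : Int) (h0 : 0 ≤ c) (h : c < 12) :
    PySem.Int.floordiv c 2 + PySem.Int.floordiv c 3 + PySem.Int.floordiv c 4 ≤ c := by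
  rw [PySem.Int.floordiv_eq_ediv_of_pos (by norm_num), PySem.Int.floordiv_eq_ediv_of_pos (by norm_num),
    PySem.Int.floordiv_eq_ediv_of_pos (by norm_num)]
  omega

lemma pvSum_neg (c : Int) (h : c < 0) :
    PySem.Int.floordiv c 2 + PySem.Int.floordiv c 3 + PySem.Int.floordiv c 4 < c := by
  rw [PySem.Int.floordiv_eq_ediv_of_pos (by norm_num), PySem.Int.floordiv_eq_ediv_of_pos (by norm_num),
    PySem.Int.floordiv_eq_ediv_of_pos (by norm_num)]
  omega

lemma pvChild_lt (c : Int) (h : 1 ≤ c) (k : Int) (hk : 2 ≤ k) (hk' : k ≤ 4) :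
    0 ≤ PySem.Int.floordiv c k ∧ PySem.Int.floordiv c k < c := by
  rw [PySem.Int.floordiv_eq_ediv_of_pos (by omega)]
  interval_cases k <;> omega

def pvInv (m : PySem.Dict Int Int) : Prop :=
  m.contains 0 = true ∧ ∀ k v : Int, m.get? k = some v → v = pvF k

lemma pvInv_insert (m : PySem.Dict Int Int) (hm : pvInv m) (k v : Int) (hv : v = pvF k) :
    pvInv (m.insert k v) := by
  constructor
  · rw [PySem.Dict.contains_insert]
    simp [hm.1]
  · intro k' v' h
    rw [PySem.Dict.get?_insert] at h
    split at h
    · cases h; subst ‹k' = k›; exact hv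
    · exact hm.2 _ _ h

lemma pvGoA_correct : ∀ (fuel : Nat) (coin : Int) (memo : PySem.Dict Int Int),
    pvInv memo → coin.toNat < fuel →
    (pvGoA fuel memo coin).2 = pvF coin ∧ pvInv (pvGoA fuel memo coin).1 := by
  intro fuel
  induction fuel with
  | zero => intro coin memo _ h; omega
  | succ n ih =>
    intro coin memo hinv hf
    by_cases hc : memo.contains coin = true
    · -- memo hit
      have hsome : (memo.get? coin).isSome := by
        rw [← PySem.Dict.contains_eq_isSome_get?, hc]
      obtain ⟨v, hv⟩ := Option.isSome_iff_exists.1 hsome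
      simp only [pvGoA, hc, if_true]
      refine ⟨?_, hinv⟩
      rw [PySem.Dict.getD_of_get?_eq_some memo 0 hv]
      exact hinv.2 _ _ hv
    · rw [Bool.not_eq_true] at hc
      by_cases hg : coin > PySem.Int.floordiv coin 2 + PySem.Int.floordiv coin 3 + PySem.Int.floordiv coin 4
      · -- shortcut branch: memo[coin] = coin
        have hlt : coin < 12 := by
          by_contra h12
          exact absurd hg (not_lt.2 (pvSum_ge coin (by omega)))
        have hval : coin = pvF coin := (pvF_base coin hlt).symm
        simp only [pvGoA, hc, Bool.false_eq_true, if_false, hg, if_true]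
        exact ⟨by rw [PySem.Dict.getD_insert_self]; exact hval,
               pvInv_insert memo hinv coin coin hval⟩
      · -- recursive branch
        have hpos : 0 ≤ coin := by
          by_contra hneg
          exact hg (pvSum_neg coin (by omega))
        have hne0 : coin ≠ 0 := by
          intro h0
          rw [h0] at hc
          rw [hinv.1] at hc
          simp at hc
        have h1c : 1 ≤ coin := by omega
        have hb2 := pvChild_lt coin h1c 2 (by norm_num) (by norm_num)
        have hb3 := pvChild_lt coin h1c 3 (by norm_num) (by norm_num)
        have hb4 := pvChild_lt coin h1c 4 (by norm_num) (by norm_num)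
        have h1 := ih (PySem.Int.floordiv coin 2) memo hinv (by omega)
        have h2 := ih (PySem.Int.floordiv coin 3) (pvGoA n memo (PySem.Int.floordiv coin 2)).1 h1.2 (by omega)
        have h3 := ih (PySem.Int.floordiv coin 4)
          (pvGoA n (pvGoA n memo (PySem.Int.floordiv coin 2)).1 (PySem.Int.floordiv coin 3)).1 h2.2 (by omega)
        have hval : pvF (PySem.Int.floordiv coin 2) + pvF (PySem.Int.floordiv coin 3) + pvF (PySem.Int.floordiv coin 4) = pvF coin := by
          by_cases h12 : coin < 12
          · rw [pvF_base _ (by omega), pvF_base _ (by omega), pvF_base _ (by omega), pvF_base _ h12]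
            have := pvSum_le coin hpos h12
            omega
          · exact (pvF_step coin h12).symm
        simp only [pvGoA, hc, Bool.false_eq_true, if_false, hg]
        rw [h1.1, h2.1, h3.1]
        exact ⟨by rw [PySem.Dict.getD_insert_self]; exact hval,
               pvInv_insert _ h3.2 coin _ hval⟩

lemma pvInit_inv : pvInv (PySem.Dict.ofList [((0:Int), (0:Int)), (1, 1)]) := by
  constructor
  · rfl
  · intro k v h
    have he : PySem.Dict.ofList [((0:Int), (0:Int)), (1, 1)] = PySem.Dict.mk [(0, 0), (1, 1)] := rfl
    rw [he, PySem.Dict.get?_mk_cons, PySem.Dict.get?_mk_cons] at h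
    split at h
    next hbeq =>
      have hk : (0 : Int) = k := by simpa using hbeq
      injection h with h'
      rw [← hk, pvF_base 0 (by norm_num)]
      omega
    next =>
      split at h
      next hbeq =>
        have hk : (1 : Int) = k := by simpa using hbeq
        injection h with h'
        rw [← hk, pvF_base 1 (by norm_num)]
        omega
      next => simp [PySem.Dict.get?] at h

lemma pvA_eq_pvF (coin : Int) : coin_exchange_sum coin = pvF coin :=
  (pvGoA_correct (coin.toNat + 1) coin _ pvInit_inv (by omega)).1

lemma pvMem_states_iff (coin x : Int) :
    x ∈ pvStates coin ↔ ∃ a b : Nat, a < PySem.Int.bitLength coin ∧ b < PySem.Int.bitLength coin ∧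
      x = PySem.Int.floordiv coin ((2 ^ a * 3 ^ b : Nat) : Int) := by
  unfold pvStates
  simp only [PySem.List.mem_sorted, PySem.Set.mem_ofList, List.mem_flatMap, List.mem_map,
    PySem.List.mem_pyRange_one]
  constructor
  · rintro ⟨a, ⟨ha0, haL⟩, b, ⟨hb0, hbL⟩, rfl⟩
    exact ⟨a.toNat, b.toNat, by omega, by omega, rfl⟩
  · rintro ⟨a, b, ha, hb, rfl⟩
    refine ⟨(a : Int), ⟨by omega, by omega⟩, (b : Int), ⟨by omega, by omega⟩, ?_⟩
    simp

lemma pvFdFd (x d e : Int) (hd : 0 < d) (he : 0 < e) :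
    PySem.Int.floordiv (PySem.Int.floordiv x d) e = PySem.Int.floordiv x (d * e) := by
  rw [PySem.Int.floordiv_eq_ediv_of_pos hd, PySem.Int.floordiv_eq_ediv_of_pos he,
    PySem.Int.floordiv_eq_ediv_of_pos (mul_pos hd he)]
  exact Int.ediv_ediv_of_nonneg hd.le

lemma pvExpBound (coin : Int) (a b : Nat)
    (h : 12 ≤ PySem.Int.floordiv coin ((2 ^ a * 3 ^ b : Nat) : Int)) :
    a + 2 < PySem.Int.bitLength coin ∧ b + 1 < PySem.Int.bitLength coin := by
  have hDpos : (0 : Int) < ((2 ^ a * 3 ^ b : Nat) : Int) := by positivity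
  have h12 : (12 : Int) * ((2 ^ a * 3 ^ b : Nat) : Int) ≤ coin := (PySem.Int.le_floordiv_iff_mul_le hDpos).1 h
  have hcpos : 0 < coin := lt_of_lt_of_le (by positivity) h12
  have hlt : coin.natAbs < 2 ^ PySem.Int.bitLength coin := PySem.Int.lt_two_pow_bitLength coin
  have hnat : 12 * (2 ^ a * 3 ^ b) < 2 ^ PySem.Int.bitLength coin := by
    have : 12 * (2 ^ a * 3 ^ b) ≤ coin.natAbs := by
      have : ((12 * (2 ^ a * 3 ^ b) : Nat) : Int) ≤ coin := by push_cast; push_cast at h12; linarith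
      omega
    omega
  have h3b : 1 ≤ 3 ^ b := Nat.one_le_pow _ _ (by norm_num)
  have h2a : 1 ≤ 2 ^ a := Nat.one_le_pow _ _ (by norm_num)
  constructor
  · have : 2 ^ (a + 2) < 2 ^ PySem.Int.bitLength coin := by
      calc 2 ^ (a + 2) = 2 ^ a * 4 := by ring
        _ ≤ 12 * (2 ^ a * 3 ^ b) := by nlinarith
        _ < 2 ^ PySem.Int.bitLength coin := hnat
    exact (Nat.pow_lt_pow_iff_right (by norm_num)).1 this
  · have : 2 ^ (b + 1) < 2 ^ PySem.Int.bitLength coin := by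
      calc 2 ^ (b + 1) ≤ 3 ^ (b + 1) := Nat.pow_le_pow_left (by norm_num) _
        _ = 3 * 3 ^ b := by ring
        _ ≤ 12 * (2 ^ a * 3 ^ b) := by nlinarith
        _ < 2 ^ PySem.Int.bitLength coin := hnat
    exact (Nat.pow_lt_pow_iff_right (by norm_num)).1 this

lemma pvChild_mem (coin x : Int) (hx : x ∈ pvStates coin) (h12 : 12 ≤ x) :
    PySem.Int.floordiv x 2 ∈ pvStates coin ∧ PySem.Int.floordiv x 3 ∈ pvStates coin ∧
      PySem.Int.floordiv x 4 ∈ pvStates coin := by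
  obtain ⟨a, b, ha, hb, rfl⟩ := (pvMem_states_iff coin x).1 hx
  obtain ⟨hA, hB⟩ := pvExpBound coin a b h12
  have hDpos : (0 : Int) < ((2 ^ a * 3 ^ b : Nat) : Int) := by positivity
  refine ⟨?_, ?_, ?_⟩
  · rw [pvFdFd _ _ _ hDpos (by norm_num)]
    refine (pvMem_states_iff coin _).2 ⟨a + 1, b, by omega, by omega, ?_⟩
    congr 1
    push_cast
    ring
  · rw [pvFdFd _ _ _ hDpos (by norm_num)]
    refine (pvMem_states_iff coin _).2 ⟨a, b + 1, by omega, by omega, ?_⟩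
    congr 1
    push_cast
    ring
  · rw [pvFdFd _ _ _ hDpos (by norm_num)]
    refine (pvMem_states_iff coin _).2 ⟨a + 2, b, by omega, by omega, ?_⟩
    congr 1
    push_cast
    ring

lemma pvStates_pairwise (coin : Int) : (pvStates coin).Pairwise (· < ·) := by
  unfold pvStates
  exact PySem.List.sorted_ofList_pairwise_lt _

lemma pvFold (coin : Int) : ∀ (l pre : List Int) (m : PySem.Dict Int Int),
    pvStates coin = pre ++ l →
    (∀ x ∈ pre, 12 ≤ x → m.getD x 0 = pvF x) →
    (∀ x ∈ pre ++ l, 12 ≤ x → (l.foldl pvStep m).getD x 0 = pvF x) := by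
  intro l
  induction l with
  | nil => intro pre m _ hm x hx h12; simpa using hm x (by simpa using hx) h12
  | cons v t ih =>
    intro pre m hsplit hm
    have hpw : (pre ++ v :: t).Pairwise (· < ·) := hsplit ▸ pvStates_pairwise coin
    have hprelt : ∀ x ∈ pre, x < v := fun x hx =>
      (List.pairwise_append.1 hpw).2.2 x hx v (List.mem_cons_self ..)
    have htgt : ∀ y ∈ t, v < y := (List.pairwise_cons.1 (List.pairwise_append.1 hpw).2.1).1
    have hm' : ∀ x ∈ pre ++ [v], 12 ≤ x → (pvStep m v).getD x 0 = pvF x := by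
      intro x hx h12
      rcases List.mem_append.1 hx with hx | hx
      · -- old keys: untouched (x < v so x ≠ v)
        have hne : x ≠ v := ne_of_lt (hprelt x hx)
        unfold pvStep
        split
        · rw [PySem.Dict.getD_insert_of_ne m _ _ hne]
          exact hm x hx h12
        · exact hm x hx h12
      · -- x = v
        have hxv : x = v := by simpa using hx
        rw [hxv] at h12 ⊢
        unfold pvStep
        rw [if_pos h12, PySem.Dict.getD_insert_self]
        have hvmem : v ∈ pvStates coin := by
          rw [hsplit]; exact List.mem_append.2 (Or.inr (List.mem_cons_self ..))
        obtain ⟨hm2, hm3, hm4⟩ := pvChild_mem coin v hvmem h12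
        have hlook : ∀ u : Int, u ∈ pvStates coin → u < v → pvLook m u = pvF u := by
          intro u hu hult
          unfold pvLook
          split
          · exact (pvF_base u (by omega)).symm
          · rename_i hu12
            have hu' : u ∈ pre ++ v :: t := hsplit ▸ hu
            rcases List.mem_append.1 hu' with h' | h'
            · exact hm u h' (by omega)
            · rcases List.mem_cons.1 h' with h'' | h''
              · omega
              · exact absurd (htgt u h'') (by omega)
        have hc2 := pvChild_lt v (by omega) 2 (by norm_num) (by norm_num)
        have hc3 := pvChild_lt v (by omega) 3 (by norm_num) (by norm_num)
        have hc4 := pvChild_lt v (by omega) 4 (by norm_num) (by norm_num)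
        rw [hlook _ hm2 (by omega), hlook _ hm3 (by omega), hlook _ hm4 (by omega)]
        exact (pvF_step v (by omega)).symm
    intro x hx h12
    have := ih (pre ++ [v]) (pvStep m v) (by simpa using hsplit) hm' x (by simpa using hx) h12
    simpa using this

lemma pvB_eq_pvF (coin : Int) : coin_exchange_sum_alt coin = pvF coin := by
  by_cases h : coin < 12
  · unfold coin_exchange_sum_alt
    rw [if_pos h, pvF_base coin h]
  · unfold coin_exchange_sum_alt
    rw [if_neg h]
    have hLpos : 0 < PySem.Int.bitLength coin := by
      by_contra hL
      have h0 : PySem.Int.bitLength coin = 0 := by omega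
      have := PySem.Int.lt_two_pow_bitLength coin
      rw [h0] at this
      simp at this
      omega
    have hself : coin ∈ pvStates coin := by
      refine (pvMem_states_iff coin coin).2 ⟨0, 0, by omega, by omega, ?_⟩
      norm_num
    exact pvFold coin (pvStates coin) [] PySem.Dict.empty rfl (by simp) coin (by simpa using hself) (by omega)

-- ===== VERDICT (by name: the statement is the Claim_ definition above) =====
theorem coin_exchange_sum_spec : Claim_equal_coin_exchange_sum := by
  intro coin _
  show _ = _
  rw [pvA_eq_pvF, pvB_eq_pvF]
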